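-- pv_equiv track=rewrite | github.com/naren-m/literature-notes | tools/scripts/backfill_wikilinks.py | frontmatter_range
-- ===== SOURCE A (Python) =====
-- def frontmatter_range(content: str) -> tuple[int, int] | None:
--     lines = content.splitlines(keepends=True)
--     if not lines or lines[0].strip() != "---":
--         return None
--
--     offset = len(lines[0])
--     for line in lines[1:]:
--         end = offset + len(line)
--         if line.strip() == "---":
--             return (0, end)
--         offset = end
--     return None
-- ===== SOURCE B (Python) =====
-- def frontmatter_range(content: str) -> tuple[int, int] | None:
--     lines = content.splitlines(keepends=True)
--     if not lines or lines[0].strip() != "---":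
--         return None
--     idx = next((i for i, line in enumerate(lines[1:], start=1)
--                 if line.strip() == "---"), None)
--     if idx is None:
--         return None
--     return (0, sum(len(l) for l in lines[:idx + 1]))
-- ===== Notes on version B (the rewrite author's own statement) =====
-- stated objective: simpler
-- what changed: B drops A's running-offset accumulator: it locates the index of the closing delimiter line and computes the end offset separately as the sum of the lengths of the line prefix.
import Mathlib
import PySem

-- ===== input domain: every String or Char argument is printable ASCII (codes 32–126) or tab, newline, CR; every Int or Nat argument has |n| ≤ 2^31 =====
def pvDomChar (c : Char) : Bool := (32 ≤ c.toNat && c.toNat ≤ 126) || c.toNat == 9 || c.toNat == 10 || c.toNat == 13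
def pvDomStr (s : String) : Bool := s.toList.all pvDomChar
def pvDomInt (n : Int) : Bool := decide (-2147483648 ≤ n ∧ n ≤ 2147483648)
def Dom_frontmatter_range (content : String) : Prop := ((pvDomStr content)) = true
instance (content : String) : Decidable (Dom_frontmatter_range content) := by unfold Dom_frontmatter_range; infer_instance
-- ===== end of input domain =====

-- B replaces A's running-offset loop by locating the index of the closing '---' line and
-- summing the lengths of the prefix of lines (objective: simpler decomposition, same cost).

-- content.splitlines(keepends=True), ported by hand (exact on Dom: the only line
-- boundaries among Dom characters are '\n', '\r' and '\r\n').
def splitKeep : List Char → List (List Char)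
  | [] => []
  | '\r' :: '\n' :: rest => ['\r', '\n'] :: splitKeep rest
  | '\r' :: rest => ['\r'] :: splitKeep rest
  | '\n' :: rest => ['\n'] :: splitKeep rest
  | c :: rest =>
    match splitKeep rest with
    | [] => [[c]]
    | l :: ls => (c :: l) :: ls

-- ===== PORT A =====
-- the for-loop over lines[1:] threading the running offset
def fmLoopA (offset : Int) : List (List Char) → Option (Int × Int)
  | [] => none
  | l :: rest =>
    let e := offset + PySem.Chars.len l
    if PySem.Chars.strip l = ['-', '-', '-'] then some (0, e)
    else fmLoopA e rest

def frontmatter_range (content : String) : Option (Int × Int) :=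
  match splitKeep content.toList with
  | [] => none
  | l0 :: rest =>
    if PySem.Chars.strip l0 ≠ ['-', '-', '-'] then none
    else fmLoopA (PySem.Chars.len l0) rest

-- ===== PORT B =====
def frontmatter_range_alt (content : String) : Option (Int × Int) :=
  match splitKeep content.toList with
  | [] => none
  | l0 :: rest =>
    if PySem.Chars.strip l0 ≠ ['-', '-', '-'] then none
    else
      match rest.findIdx? (fun l => PySem.Chars.strip l = ['-', '-', '-']) with
      | none => none
      | some j => some (0, (((l0 :: rest).take (j + 2)).map PySem.Chars.len).sum)

-- ===== PRECONDITION & SPEC =====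
def Spec_frontmatter_range (content : String) (out : Option (Int × Int)) : Prop := out = frontmatter_range_alt content
instance (content : String) (out : Option (Int × Int)) : Decidable (Spec_frontmatter_range content out) := by unfold Spec_frontmatter_range; infer_instance

-- ===== CLAIM (what is proved, stated in full; the proofs are below) =====
def Claim_equal_frontmatter_range : Prop := ∀ (content : String), Dom_frontmatter_range content → Spec_frontmatter_range content (frontmatter_range content)

-- ===== LEMMAS AND PROOFS =====

-- A's offset loop computes, at the first matching line, the sum of prefix lengths.
theorem fmLoopA_eq_findIdx (ls : List (List Char)) (off : Int) :
    fmLoopA off ls =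
      (ls.findIdx? (fun l => PySem.Chars.strip l = ['-', '-', '-'])).map
        (fun j => (0, off + ((ls.take (j + 1)).map PySem.Chars.len).sum)) := by
  induction ls generalizing off with
  | nil => rfl
  | cons l rest ih =>
    simp only [fmLoopA, List.findIdx?_cons]
    by_cases h : PySem.Chars.strip l = ['-', '-', '-']
    · simp [h]
    · simp only [h, decide_false, ih]
      cases rest.findIdx? (fun l => PySem.Chars.strip l = ['-', '-', '-']) with
      | none => rfl
      | some j =>
        simp [List.take_succ_cons, List.sum_cons]
        ring

-- ===== VERDICT (by name: the statement is the Claim_ definition above) =====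
theorem frontmatter_range_spec : Claim_equal_frontmatter_range := by
  intro content _
  unfold Spec_frontmatter_range frontmatter_range frontmatter_range_alt
  cases h : splitKeep content.toList with
  | nil => rfl
  | cons l0 rest =>
    by_cases h0 : PySem.Chars.strip l0 = ['-', '-', '-']
    · simp only [if_neg (not_not_intro h0), fmLoopA_eq_findIdx]
      cases rest.findIdx? (fun l => PySem.Chars.strip l = ['-', '-', '-']) with
      | none => rfl
      | some j =>
        simp [List.take_succ_cons, List.sum_cons]
    · simp [h0]
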